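-- pv_equiv track=rewrite | github.com/DuLiCS/PointCloud | surface_completion.py | find_pp
-- ===== SOURCE A (Python) =====
-- def find_pp(vector, vector2, p, maxz):
--     """
--     Find projection points
--     Equivalent to: find_pp(vector, vector2, p, maxz)
--     """
--     n = len(vector)
--
--     if p == 1 or p == n:
--         p1, p2 = 0, 0
--         Z1, Z2 = maxz, maxz
--     else:
--         # Find left neighbor
--         p1, Z1 = 0, maxz
--         for i in range(p-1, -1, -1):
--             if vector[i] == 1:
--                 p1 = i
--                 Z1 = vector2[i]
--                 break
--
--         # Find right neighbor
--         p2, Z2 = 0, maxz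
--         for i in range(p, n):
--             if vector[i] == 1:
--                 p2 = i
--                 Z2 = vector2[i]
--                 break
--
--     return p1, p2, Z1, Z2
-- ===== SOURCE B (Python) =====
-- from bisect import bisect_left
--
-- def find_pp(vector, vector2, p, maxz):
--     """
--     Find projection points.
--     Index-table + binary-search re-implementation: build the sorted list of
--     positions holding 1 once, then locate the neighbors with bisect.
--     """
--     n = len(vector)
--     if p == 1 or p == n:
--         return 0, 0, maxz, maxz
--     ones = [i for i, v in enumerate(vector) if v == 1]
--     k = bisect_left(ones, p)
--     if k > 0:
--         p1, Z1 = ones[k - 1], vector2[ones[k - 1]]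
--     else:
--         p1, Z1 = 0, maxz
--     if k < len(ones):
--         p2, Z2 = ones[k], vector2[ones[k]]
--     else:
--         p2, Z2 = 0, maxz
--     return p1, p2, Z1, Z2
-- ===== Notes on version B (the rewrite author's own statement) =====
-- stated objective: alternative
-- what changed: Replaces the two outward linear scans around p by building the sorted index list of 1-positions once and locating both neighbors with a single bisect_left binary search.
-- outside the precondition, e.g. on find_pp([1, 0, 1], [4, 5, 6], -1, 99): A returns (0, -1, 99, 6), B returns (0, 0, 99, 4); on find_pp([0, 1, 0], [0, 5], 2, 99): A returns (1, 0, 5, 99), B returns (1, 0, 5, 99)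
import Mathlib
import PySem

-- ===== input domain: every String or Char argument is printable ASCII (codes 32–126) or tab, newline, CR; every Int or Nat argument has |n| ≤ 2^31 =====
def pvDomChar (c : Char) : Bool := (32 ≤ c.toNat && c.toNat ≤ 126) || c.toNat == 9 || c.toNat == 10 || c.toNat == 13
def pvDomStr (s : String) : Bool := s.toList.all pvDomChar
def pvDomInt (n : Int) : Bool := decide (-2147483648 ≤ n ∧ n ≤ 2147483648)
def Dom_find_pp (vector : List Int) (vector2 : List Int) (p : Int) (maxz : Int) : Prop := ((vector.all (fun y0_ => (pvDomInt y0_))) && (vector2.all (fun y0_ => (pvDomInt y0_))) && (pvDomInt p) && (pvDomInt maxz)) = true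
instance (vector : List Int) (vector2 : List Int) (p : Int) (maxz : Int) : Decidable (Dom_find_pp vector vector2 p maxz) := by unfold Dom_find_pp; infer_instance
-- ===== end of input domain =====

-- B replaces A's two outward linear scans around p by an index table of the 1-positions
-- plus one bisect_left lookup (objective: alternative algorithm, similar cost).

-- ===== PORT A =====
-- first-hit scan shared by A's two 'for … if … break' loops: returns (i, vector2[i])
-- at the first index i in the list with vector[i] == 1, else (0, maxz)
def pvScanA (vector vector2 : List Int) (maxz : Int) : List Int → Int × Int
  | [] => (0, maxz)
  | i :: rest =>
    if PySem.List.pyGetD vector i 0 == 1 then (i, PySem.List.pyGetD vector2 i 0)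
    else pvScanA vector vector2 maxz rest

def find_pp (vector : List Int) (vector2 : List Int) (p : Int) (maxz : Int) : Int × Int × Int × Int :=
  let n : Int := vector.length
  if p == 1 || p == n then (0, 0, maxz, maxz)
  else
    let l := pvScanA vector vector2 maxz (PySem.List.pyRange (p - 1) (-1) (-1))
    let r := pvScanA vector vector2 maxz (PySem.List.pyRange p n 1)
    (l.1, r.1, l.2, r.2)

-- ===== PORT B =====
def find_pp_alt (vector : List Int) (vector2 : List Int) (p : Int) (maxz : Int) : Int × Int × Int × Int :=
  let n : Int := vector.length
  if p == 1 || p == n then (0, 0, maxz, maxz)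
  else
    -- ones = [i for i, v in enumerate(vector) if v == 1]
    let ones : List Int :=
      (PySem.List.enumerate vector 0).filterMap (fun iv => if iv.2 == 1 then some iv.1 else none)
    -- k = bisect_left(ones, p); exact for the sorted list ones: number of elements < p
    let k : Nat := ones.countP (fun i => decide (i < p))
    let left : Int × Int :=
      if 0 < k then
        match ones[k - 1]? with
        | some j => (j, PySem.List.pyGetD vector2 j 0)
        | none => (0, maxz)
      else (0, maxz)
    let right : Int × Int :=
      match ones[k]? with
      | some j => (j, PySem.List.pyGetD vector2 j 0)
      | none => (0, maxz)
    (left.1, right.1, left.2, right.2)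

-- ===== PRECONDITION & SPEC =====
-- Pre_ excludes inputs where Python A raises IndexError (p > len(vector), or vector2 shorter
-- than vector with a hit index beyond it) together with p < 0, where A reads vector via
-- Python's negative-index wraparound; the length bound also drops some mismatched-length
-- inputs on which A returns (and B returns the same value) — mismatched parallel arrays
-- are a defensible corner of the function's domain.
def Pre_find_pp (vector : List Int) (vector2 : List Int) (p : Int) (maxz : Int) : Prop :=
  vector.length ≤ vector2.length ∧ 0 ≤ p ∧ p ≤ (vector.length : Int)
instance (vector : List Int) (vector2 : List Int) (p : Int) (maxz : Int) : Decidable (Pre_find_pp vector vector2 p maxz) := by unfold Pre_find_pp; infer_instance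

def pvWitness_find_pp : List Int × List Int × Int × Int := ([0, 1, 0], [0, 5, 9], 2, 99)

def Spec_find_pp (vector : List Int) (vector2 : List Int) (p : Int) (maxz : Int) (out : Int × Int × Int × Int) : Prop := out = find_pp_alt vector vector2 p maxz
instance (vector : List Int) (vector2 : List Int) (p : Int) (maxz : Int) (out : Int × Int × Int × Int) : Decidable (Spec_find_pp vector vector2 p maxz out) := by unfold Spec_find_pp; infer_instance

-- ===== CLAIM (what is proved, stated in full; the proofs are below) =====
def Claim_equal_find_pp : Prop := ∀ (vector : List Int) (vector2 : List Int) (p : Int) (maxz : Int), Dom_find_pp vector vector2 p maxz → Pre_find_pp vector vector2 p maxz → Spec_find_pp vector vector2 p maxz (find_pp vector vector2 p maxz)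

-- ===== LEMMAS AND PROOFS =====

-- A's break-loop is the first element of the filtered list
theorem pvScanA_eq (vector vector2 : List Int) (maxz : Int) (l : List Int) :
    pvScanA vector vector2 maxz l =
      match (l.filter (fun i => PySem.List.pyGetD vector i 0 == 1)).head? with
      | some j => (j, PySem.List.pyGetD vector2 j 0)
      | none => (0, maxz) := by
  induction l with
  | nil => rfl
  | cons i rest ih =>
    by_cases h : (PySem.List.pyGetD vector i 0 == 1) = true
    · simp [pvScanA, h, List.filter_cons]
    · simp [pvScanA, h, List.filter_cons, ih]

-- generic: a guard-comprehension is a filter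
theorem pvFilterMap_guard (P : Int → Bool) :
    ∀ l : List Int, l.filterMap (fun j => if P j then some j else none) = l.filter P
  | [] => rfl
  | j :: rest => by
    by_cases h : P j = true
    · simp [List.filterMap_cons, List.filter_cons, h, pvFilterMap_guard P rest]
    · simp [List.filterMap_cons, List.filter_cons, h, pvFilterMap_guard P rest]

-- B's comprehension over enumerate is the filtered index range
theorem pvOnes_eq (vector : List Int) :
    (PySem.List.enumerate vector 0).filterMap (fun iv => if iv.2 == 1 then some iv.1 else none)
      = (PySem.List.pyRange 0 (vector.length : Int) 1).filter
          (fun i => PySem.List.pyGetD vector i 0 == 1) := by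
  rw [PySem.List.enumerate_eq_map_pyRange (d := 0), List.filterMap_map]
  have h := pvFilterMap_guard (fun i => PySem.List.pyGetD vector i 0 == 1)
    (PySem.List.pyRange 0 (PySem.List.len vector) 1)
  simpa using h

theorem find_pp_spec_aux (vector vector2 : List Int) (p maxz : Int)
    (h2 : 0 ≤ p) (h3 : p ≤ (vector.length : Int)) :
    find_pp vector vector2 p maxz = find_pp_alt vector vector2 p maxz := by
  unfold find_pp find_pp_alt
  by_cases hg : (p == 1 || p == (vector.length : Int)) = true
  · simp [hg]
  · simp only [hg, if_false]
    rw [pvScanA_eq, pvScanA_eq, pvOnes_eq]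
    rw [PySem.List.pyRange_neg_one_eq_reverse]
    have hm1 : (-1 : Int) + 1 = 0 := by ring
    have hm2 : p - 1 + 1 = p := by ring
    rw [hm1, hm2, List.filter_reverse, List.head?_reverse]
    rw [PySem.List.pyRange_one_append 0 p (vector.length : Int) h2 h3, List.filter_append]
    set F := fun i => PySem.List.pyGetD vector i 0 == 1 with hF
    set A1 := (PySem.List.pyRange 0 p 1).filter F with hA1
    set A2 := (PySem.List.pyRange p (vector.length : Int) 1).filter F with hA2
    have hk : (A1 ++ A2).countP (fun i => decide (i < p)) = A1.length := by
      rw [List.countP_append]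
      have c1 : A1.countP (fun i => decide (i < p)) = A1.length := by
        apply List.countP_eq_length.mpr
        intro x hx
        have := (List.mem_filter.mp (hA1 ▸ hx)).1
        have := (PySem.List.mem_pyRange_one.mp this).2
        simpa using this
      have c2 : A2.countP (fun i => decide (i < p)) = 0 := by
        apply List.countP_eq_zero.mpr
        intro x hx
        have := (List.mem_filter.mp (hA2 ▸ hx)).1
        have := (PySem.List.mem_pyRange_one.mp this).1
        simpa using not_lt.mpr this
      omega
    rw [hk]
    have hright : (A1 ++ A2)[A1.length]? = A2.head? := by
      rw [List.getElem?_append_right (le_refl _)]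
      simp [List.head?_eq_getElem?]
    have hleft : (if 0 < A1.length then
          match (A1 ++ A2)[A1.length - 1]? with
          | some j => (j, PySem.List.pyGetD vector2 j 0)
          | none => ((0 : Int), maxz)
        else ((0 : Int), maxz)) = (match A1.getLast? with
          | some j => (j, PySem.List.pyGetD vector2 j 0)
          | none => ((0 : Int), maxz)) := by
      rcases eq_or_ne A1 [] with h | h
      · simp [h]
      · have hlen : 0 < A1.length := List.length_pos_iff.mpr h
        rw [if_pos hlen, List.getElem?_append_left (by omega), ← List.getLast?_eq_getElem?]
    rw [hright, hleft]

-- ===== VERDICT (by name: the statement is the Claim_ definition above) =====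
theorem find_pp_spec : Claim_equal_find_pp := by
  intro vector vector2 p maxz _ hpre
  exact find_pp_spec_aux vector vector2 p maxz hpre.2.1 hpre.2.2
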